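-- pv_equiv track=rewrite | github.com/MarceloMassarente/peopledd | src/peopledd/nodes/n0_entity_resolution.py | _ticker_match_score
-- ===== SOURCE A (Python) =====
-- def _ticker_match_score(candidate: dict, ticker_hint: str | None) -> int:
--     """2 = exact ticker match, 1 = partial / substring, 0 = no match."""
--     if not ticker_hint:
--         return 0
--     th = ticker_hint.strip().upper().replace(" ", "")
--     if not th:
--         return 0
--     tickers = candidate.get("tickers") or []
--     best = 0
--     for t in tickers:
--         ts = str(t).strip().upper()
--         if not ts:
--             continue
--         if ts == th:
--             best = max(best, 2)
--         elif th in ts or ts in th: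
--             best = max(best, 1)
--     return best
-- ===== SOURCE B (Python) =====
-- def _ticker_match_score(candidate: dict, ticker_hint: str | None) -> int:
--     """2 = exact ticker match, 1 = partial / substring, 0 = no match."""
--     if not ticker_hint:
--         return 0
--     th = ticker_hint.strip().upper().replace(" ", "")
--     if not th:
--         return 0
--     norm = [ts for ts in (str(t).strip().upper() for t in (candidate.get("tickers") or [])) if ts]
--     if th in norm:
--         return 2
--     if any(th in ts or ts in th for ts in norm):
--         return 1
--     return 0
-- ===== Notes on version B (the rewrite author's own statement) =====
-- stated objective: simpler
-- what changed: Replaced the single max-accumulating loop by normalizing the tickers once and doing a prioritized two-phase check: exact membership first (return 2), then a substring scan (return 1), else 0.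
import Mathlib
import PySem

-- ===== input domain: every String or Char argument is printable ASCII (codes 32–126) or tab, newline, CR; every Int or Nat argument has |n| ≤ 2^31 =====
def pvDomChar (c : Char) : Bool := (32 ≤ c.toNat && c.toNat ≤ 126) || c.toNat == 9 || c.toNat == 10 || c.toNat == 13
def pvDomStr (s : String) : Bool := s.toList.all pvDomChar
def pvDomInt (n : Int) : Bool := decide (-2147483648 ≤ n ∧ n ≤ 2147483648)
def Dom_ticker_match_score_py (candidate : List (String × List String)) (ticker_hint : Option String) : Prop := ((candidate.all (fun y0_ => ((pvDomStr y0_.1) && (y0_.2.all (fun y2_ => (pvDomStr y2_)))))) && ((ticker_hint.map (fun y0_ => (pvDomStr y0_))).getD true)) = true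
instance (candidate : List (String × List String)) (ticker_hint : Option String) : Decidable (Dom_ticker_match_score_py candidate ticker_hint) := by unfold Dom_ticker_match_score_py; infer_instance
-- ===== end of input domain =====

-- B replaces A's max-accumulating loop by a normalize-once, prioritized two-phase check (objective: simpler).

-- ===== PORT A =====
-- normalization of one candidate ticker: str(t).strip().upper()
def pvNormTicker (t : String) : String := PySem.Str.upper (PySem.Str.strip t)

-- th in ts or ts in th
def pvPartial (th ts : String) : Bool := PySem.Str.isIn th ts || PySem.Str.isIn ts th

-- A's loop body (one iteration of the for-loop over tickers)
def pvStep (th : String) (best : Int) (t : String) : Int :=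
  let ts := pvNormTicker t
  if ts = "" then best
  else if ts = th then max best 2
  else if pvPartial th ts then max best 1
  else best

def ticker_match_score_py (candidate : List (String × List String)) (ticker_hint : Option String) : Int :=
  match ticker_hint with
  | none => 0
  | some h =>
    if h = "" then 0
    else
      let th := PySem.Str.replace (PySem.Str.upper (PySem.Str.strip h)) " " ""
      if th = "" then 0
      else
        -- candidate.get("tickers") or []  (None → [], and an empty list stays empty)
        let tickers := ((PySem.Dict.mk candidate).get? "tickers").getD []
        tickers.foldl (pvStep th) 0

-- ===== PORT B =====
def ticker_match_score_py_alt (candidate : List (String × List String)) (ticker_hint : Option String) : Int :=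
  match ticker_hint with
  | none => 0
  | some h =>
    if h = "" then 0
    else
      let th := PySem.Str.replace (PySem.Str.upper (PySem.Str.strip h)) " " ""
      if th = "" then 0
      else
        let norm := ((((PySem.Dict.mk candidate).get? "tickers").getD []).map pvNormTicker).filter
          (fun ts => ts ≠ "")
        if th ∈ norm then 2
        else if norm.any (fun ts => pvPartial th ts) then 1
        else 0

-- ===== PRECONDITION & SPEC =====
def Spec_ticker_match_score_py (candidate : List (String × List String)) (ticker_hint : Option String) (out : Int) : Prop := out = ticker_match_score_py_alt candidate ticker_hint
instance (candidate : List (String × List String)) (ticker_hint : Option String) (out : Int) : Decidable (Spec_ticker_match_score_py candidate ticker_hint out) := by unfold Spec_ticker_match_score_py; infer_instance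

-- ===== CLAIM (what is proved, stated in full; the proofs are below) =====
def Claim_equal_ticker_match_score_py : Prop := ∀ (candidate : List (String × List String)) (ticker_hint : Option String), Dom_ticker_match_score_py candidate ticker_hint → Spec_ticker_match_score_py candidate ticker_hint (ticker_match_score_py candidate ticker_hint)

-- ===== LEMMAS AND PROOFS =====

-- B's two-phase score on an already-normalized list
def pvScore2 (th : String) (ns : List String) : Int :=
  if th ∈ ns then 2 else if ns.any (fun ts => pvPartial th ts) then 1 else 0

theorem pvScore2_bounds (th : String) (ns : List String) :
    0 ≤ pvScore2 th ns ∧ pvScore2 th ns ≤ 2 := by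
  unfold pvScore2; split_ifs <;> omega

theorem pvScore2_cons (th ts : String) (ns : List String) :
    pvScore2 th (ts :: ns) =
      if ts = th then 2
      else if pvPartial th ts then max 1 (pvScore2 th ns)
      else pvScore2 th ns := by
  unfold pvScore2
  simp only [List.mem_cons, List.any_cons]
  by_cases h1 : ts = th
  · simp [h1]
  · by_cases h2 : pvPartial th ts
    · by_cases h3 : th ∈ ns <;> simp [h1, h2, h3, Ne.symm h1] <;> split_ifs <;> omega
    · simp [h1, h2, Ne.symm h1]

theorem pvNorm_cons (t : String) (l : List String) :
    ((t :: l).map pvNormTicker).filter (fun ts => ts ≠ "") =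
      if pvNormTicker t = "" then (l.map pvNormTicker).filter (fun ts => ts ≠ "")
      else pvNormTicker t :: (l.map pvNormTicker).filter (fun ts => ts ≠ "") := by
  simp only [List.map_cons, List.filter_cons]
  by_cases h : pvNormTicker t = "" <;> simp [h]

-- A's fold from accumulator b equals max b (B's two-phase score on the normalized list)
theorem pvFold_eq_score (th : String) (l : List String) (b : Int) (hb : 0 ≤ b) :
    l.foldl (pvStep th) b =
      max b (pvScore2 th ((l.map pvNormTicker).filter (fun ts => ts ≠ ""))) := by
  induction l generalizing b with
  | nil => simp [pvScore2]; omega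
  | cons t l ih =>
    rw [List.foldl_cons, pvNorm_cons]
    have hs := pvScore2_bounds th ((l.map pvNormTicker).filter (fun ts => ts ≠ ""))
    by_cases h0 : pvNormTicker t = ""
    · rw [if_pos h0]
      have hst : pvStep th b t = b := by simp [pvStep, h0]
      rw [hst]; exact ih b hb
    · rw [if_neg h0, pvScore2_cons]
      by_cases h1 : pvNormTicker t = th
      · have hth : ¬ th = "" := h1 ▸ h0
        have hst : pvStep th b t = max b 2 := by simp [pvStep, h1, hth]
        rw [hst, if_pos h1, ih _ (by omega)]
        omega
      · by_cases h2 : pvPartial th (pvNormTicker t)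
        · have hst : pvStep th b t = max b 1 := by simp [pvStep, h0, h1, h2]
          rw [hst, if_neg h1, if_pos h2, ih _ (by omega)]
          omega
        · have hst : pvStep th b t = b := by simp [pvStep, h0, h1, h2]
          rw [hst, if_neg h1, if_neg h2]; exact ih b hb

-- ===== VERDICT (by name: the statement is the Claim_ definition above) =====
theorem ticker_match_score_py_spec : Claim_equal_ticker_match_score_py := by
  intro candidate ticker_hint _
  unfold Spec_ticker_match_score_py ticker_match_score_py ticker_match_score_py_alt
  match ticker_hint with
  | none => rfl
  | some h =>
    by_cases hh : h = ""
    · simp [hh]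
    · simp only [hh, if_false]
      by_cases hth0 : PySem.Str.replace (PySem.Str.upper (PySem.Str.strip h)) " " "" = ""
      · simp [hth0]
      · simp only [hth0, if_false]
        rw [pvFold_eq_score _ _ 0 le_rfl]
        have hs := pvScore2_bounds (PySem.Str.replace (PySem.Str.upper (PySem.Str.strip h)) " " "")
          (((((PySem.Dict.mk candidate).get? "tickers").getD []).map pvNormTicker).filter
            (fun ts => ts ≠ ""))
        unfold pvScore2 at *
        split_ifs <;> omega
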